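-- pv_equiv track=rewrite | github.com/weiyinfu/learnMatplotlib | 游戏/拼图.py | no_same
-- ===== SOURCE A (Python) =====
-- def no_same(a):
--     # 判断是否存在相邻且相等的元素
--     for i in range(4):
--         for j in range(4):
--             if i + 1 < 4 and a[i][j] == a[i + 1][j]:
--                 return False
--             if j + 1 < 4 and a[i][j] == a[i][j + 1]:
--                 return False
--     return True
-- ===== SOURCE B (Python) =====
-- def no_same(a):
--     # Recursion over the flat cell index k = 0..15 (row i, column j via divmod)
--     # instead of two nested counting loops.
--     def ok(k):
--         if k == 16:
--             return True
--         i, j = divmod(k, 4)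
--         if i < 3 and a[i][j] == a[i + 1][j]:
--             return False
--         if j < 3 and a[i][j] == a[i][j + 1]:
--             return False
--         return ok(k + 1)
--     return ok(0)
-- ===== Notes on version B (the rewrite author's own statement) =====
-- stated objective: alternative
-- what changed: Replaced A's two nested counting for-loops by a recursion over the single flattened cell index k = 0..15, recovering the row/column pair with divmod(k, 4) at each step (iterative-to-recursive decomposition with the same comparison order).
import Mathlib
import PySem

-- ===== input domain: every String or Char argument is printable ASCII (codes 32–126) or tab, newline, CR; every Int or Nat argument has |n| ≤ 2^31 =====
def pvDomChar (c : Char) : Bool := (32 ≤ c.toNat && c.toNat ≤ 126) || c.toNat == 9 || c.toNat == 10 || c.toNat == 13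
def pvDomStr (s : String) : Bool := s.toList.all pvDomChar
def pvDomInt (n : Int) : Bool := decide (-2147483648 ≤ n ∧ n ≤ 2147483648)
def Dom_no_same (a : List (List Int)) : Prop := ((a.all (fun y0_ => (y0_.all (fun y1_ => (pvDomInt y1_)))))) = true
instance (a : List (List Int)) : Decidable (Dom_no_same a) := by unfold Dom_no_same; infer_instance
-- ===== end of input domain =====

-- B replaces A's two nested counting loops by a recursion over the flattened cell index with divmod
-- (same comparison order, so identical raise/return behaviour); alternative decomposition, same cost.


-- a[i][j], total form: exact whenever the indices are in range (Python raises IndexError otherwise;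
-- on an input where Python returns, every comparison actually evaluated only touches in-range cells,
-- so both ports compute their Python's value there)
def pvG (a : List (List Int)) (i j : Int) : Int :=
  PySem.List.pyGetD (PySem.List.pyGetD a i []) j 0

-- ===== PORT A =====
-- nested 'for i in range(4): for j in range(4):' with early return, as a scan of the (i, j) pairs
def pvLoopA (a : List (List Int)) : List (Int × Int) → Bool
  | [] => true
  | (i, j) :: rest =>
    if i + 1 < 4 ∧ pvG a i j = pvG a (i + 1) j then false
    else if j + 1 < 4 ∧ pvG a i j = pvG a i (j + 1) then false
    else pvLoopA a rest

def no_same (a : List (List Int)) : Bool :=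
  pvLoopA a ((PySem.List.pyRange 0 4 1).flatMap fun i =>
    (PySem.List.pyRange 0 4 1).map fun j => (i, j))

-- ===== PORT B =====
-- 'def ok(k)' of Source B; k : Nat since Python's k only takes the values 0..16 (the base-case guard is
-- written '16 ≤ k' instead of 'k = 16' purely so termination is structural on 16 - k; the two agree
-- on every reachable call)
def pvOk (a : List (List Int)) (k : Nat) : Bool :=
  if 16 ≤ k then true
  else
    let i : Int := ((k / 4 : Nat) : Int)   -- divmod(k, 4)
    let j : Int := ((k % 4 : Nat) : Int)
    if i < 3 ∧ pvG a i j = pvG a (i + 1) j then false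
    else if j < 3 ∧ pvG a i j = pvG a i (j + 1) then false
    else pvOk a (k + 1)
termination_by 16 - k
decreasing_by omega

def no_same_alt (a : List (List Int)) : Bool := pvOk a 0

-- ===== PRECONDITION & SPEC =====
-- a[i][j] as an optional lookup, used only by Pre_
def pvCellOpt (a : List (List Int)) (i j : Nat) : Option Int := (a[i]?).bind fun r => r[j]?

-- cell (i, j) is fully checked in range with no equal neighbour found
def pvCellOk (a : List (List Int)) (i j : Nat) : Bool :=
  (pvCellOpt a i j).isSome &&
  (decide (3 ≤ i) || ((pvCellOpt a (i + 1) j).isSome && pvCellOpt a (i + 1) j != pvCellOpt a i j)) &&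
  (decide (3 ≤ j) || ((pvCellOpt a i (j + 1)).isSome && pvCellOpt a i (j + 1) != pvCellOpt a i j))

-- at cell (i, j) an equal adjacent pair is found, every access made up to that comparison in range
def pvCellHit (a : List (List Int)) (i j : Nat) : Bool :=
  (pvCellOpt a i j).isSome &&
  ((decide (i < 3) && (pvCellOpt a (i + 1) j).isSome && pvCellOpt a (i + 1) j == pvCellOpt a i j) ||
   ((decide (3 ≤ i) || ((pvCellOpt a (i + 1) j).isSome && pvCellOpt a (i + 1) j != pvCellOpt a i j)) &&
    decide (j < 3) && (pvCellOpt a i (j + 1)).isSome && pvCellOpt a i (j + 1) == pvCellOpt a i j))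

-- Exactly the inputs on which Python A returns (B raises IndexError on the same inputs, in the same
-- scan order): at some scan position k the scan stops — completion (k = 16) or an equal adjacent
-- pair found with all its accesses in range — with every earlier cell checked in range and unequal.
def Pre_no_same (a : List (List Int)) : Prop :=
  ∃ k < 17, (∀ m < k, pvCellOk a (m / 4) (m % 4) = true) ∧
    (k = 16 ∨ pvCellHit a (k / 4) (k % 4) = true)
instance (a : List (List Int)) : Decidable (Pre_no_same a) := by unfold Pre_no_same; infer_instance

def pvWitness_no_same : List (List Int) :=
  [[1, 2, 3, 4], [5, 6, 7, 8], [9, 10, 11, 12], [13, 14, 15, 16]]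

def Spec_no_same (a : List (List Int)) (out : Bool) : Prop := out = no_same_alt a
instance (a : List (List Int)) (out : Bool) : Decidable (Spec_no_same a out) := by unfold Spec_no_same; infer_instance

-- ===== CLAIM (what is proved, stated in full; the proofs are below) =====
def Claim_equal_no_same : Prop := ∀ (a : List (List Int)), Dom_no_same a → Pre_no_same a → Spec_no_same a (no_same a)

-- ===== LEMMAS AND PROOFS =====
set_option maxRecDepth 4096 in
lemma no_same_eq_alt (a : List (List Int)) : no_same a = no_same_alt a := by
  have hA : ((PySem.List.pyRange 0 4 1).flatMap fun i =>
      (PySem.List.pyRange 0 4 1).map fun j => ((i : Int), (j : Int))) =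
      [(0,0),(0,1),(0,2),(0,3),(1,0),(1,1),(1,2),(1,3),
       (2,0),(2,1),(2,2),(2,3),(3,0),(3,1),(3,2),(3,3)] := by decide
  simp only [no_same, no_same_alt, hA]
  simp [pvLoopA, pvOk]

-- ===== VERDICT (by name: the statement is the Claim_ definition above) =====
theorem no_same_spec : Claim_equal_no_same := by
  intro a _ _
  exact no_same_eq_alt a
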